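-- pv_equiv track=rewrite | github.com/AllisonMatos/allma-enum | plugins/extractors/wappalyzer.py | get_tech_category
-- ===== SOURCE A (Python) =====
-- def get_tech_category(tech_name: str) -> str:
--     """
--     Retorna a categoria da tecnologia.
--     """
--     categories = {
--         "CMS": ["WordPress", "Drupal", "Joomla"],
--         "Frontend Framework": ["React", "Vue.js", "Angular", "Next.js", "Nuxt.js"],
--         "JavaScript Library": ["jQuery", "Bootstrap", "Tailwind CSS"],
--         "Backend Framework": ["Laravel", "Django", "Ruby on Rails", "Express", "ASP.NET", "Spring"],
--         "Web Server": ["Nginx", "Apache", "IIS"],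
--         "CDN/Proxy": ["Cloudflare", "Amazon CloudFront"],
--         "E-commerce": ["Shopify", "WooCommerce", "Magento"],
--         "Analytics": ["Google Analytics", "Google Tag Manager", "Facebook Pixel"],
--         "Security": ["reCAPTCHA", "hCaptcha"],
--         "Programming Language": ["PHP", "Java", "Node.js"],
--     }
--
--     for category, techs in categories.items():
--         if tech_name in techs:
--             return category
--
--     return "Other"
-- ===== SOURCE B (Python) =====
-- _TECH_CATEGORY = {
--     "WordPress": "CMS", "Drupal": "CMS", "Joomla": "CMS",
--     "React": "Frontend Framework", "Vue.js": "Frontend Framework",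
--     "Angular": "Frontend Framework", "Next.js": "Frontend Framework",
--     "Nuxt.js": "Frontend Framework",
--     "jQuery": "JavaScript Library", "Bootstrap": "JavaScript Library",
--     "Tailwind CSS": "JavaScript Library",
--     "Laravel": "Backend Framework", "Django": "Backend Framework",
--     "Ruby on Rails": "Backend Framework", "Express": "Backend Framework",
--     "ASP.NET": "Backend Framework", "Spring": "Backend Framework",
--     "Nginx": "Web Server", "Apache": "Web Server", "IIS": "Web Server",
--     "Cloudflare": "CDN/Proxy", "Amazon CloudFront": "CDN/Proxy",
--     "Shopify": "E-commerce", "WooCommerce": "E-commerce", "Magento": "E-commerce",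
--     "Google Analytics": "Analytics", "Google Tag Manager": "Analytics",
--     "Facebook Pixel": "Analytics",
--     "reCAPTCHA": "Security", "hCaptcha": "Security",
--     "PHP": "Programming Language", "Java": "Programming Language",
--     "Node.js": "Programming Language",
-- }
--
-- def get_tech_category(tech_name: str) -> str:
--     """
--     Retorna a categoria da tecnologia.
--     """
--     return _TECH_CATEGORY.get(tech_name, "Other")
-- ===== Notes on version B (the rewrite author's own statement) =====
-- stated objective: idiomatic
-- what changed: Replaces the loop over categories with membership tests on each list by a single flat name-to-category dict and one constant-time lookup with the same fallback category for unknown names.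
import Mathlib
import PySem

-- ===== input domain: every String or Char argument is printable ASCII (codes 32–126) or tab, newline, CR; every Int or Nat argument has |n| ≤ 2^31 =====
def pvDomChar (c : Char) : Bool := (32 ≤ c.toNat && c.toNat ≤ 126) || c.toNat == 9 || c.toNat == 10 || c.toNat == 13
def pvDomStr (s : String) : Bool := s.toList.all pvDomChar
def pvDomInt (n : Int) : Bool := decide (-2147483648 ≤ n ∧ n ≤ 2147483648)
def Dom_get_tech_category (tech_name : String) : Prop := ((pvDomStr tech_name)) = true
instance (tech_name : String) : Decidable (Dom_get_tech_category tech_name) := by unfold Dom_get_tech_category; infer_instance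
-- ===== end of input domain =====

-- B replaces A's category loop with one flat name→category dict lookup (objective: idiomatic).

-- ===== PORT A =====
-- A's dict literal, iterated in insertion order as (category, techs) pairs.
def pvCatsA : List (String × List String) :=
  [ ("CMS", ["WordPress", "Drupal", "Joomla"]),
    ("Frontend Framework", ["React", "Vue.js", "Angular", "Next.js", "Nuxt.js"]),
    ("JavaScript Library", ["jQuery", "Bootstrap", "Tailwind CSS"]),
    ("Backend Framework", ["Laravel", "Django", "Ruby on Rails", "Express", "ASP.NET", "Spring"]),
    ("Web Server", ["Nginx", "Apache", "IIS"]),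
    ("CDN/Proxy", ["Cloudflare", "Amazon CloudFront"]),
    ("E-commerce", ["Shopify", "WooCommerce", "Magento"]),
    ("Analytics", ["Google Analytics", "Google Tag Manager", "Facebook Pixel"]),
    ("Security", ["reCAPTCHA", "hCaptcha"]),
    ("Programming Language", ["PHP", "Java", "Node.js"]) ]

-- the 'for category, techs in categories.items(): if tech_name in techs: return category' loop
def pvLoopA (tech_name : String) : List (String × List String) → String
  | [] => "Other"
  | (category, techs) :: rest =>
      if techs.contains tech_name then category else pvLoopA tech_name rest

def get_tech_category (tech_name : String) : String :=
  pvLoopA tech_name pvCatsA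

-- ===== PORT B =====
-- B's flat module-level dict _TECH_CATEGORY
def pvTechCategory : PySem.Dict String String := PySem.Dict.ofList
  [ ("WordPress", "CMS"), ("Drupal", "CMS"), ("Joomla", "CMS"),
    ("React", "Frontend Framework"), ("Vue.js", "Frontend Framework"),
    ("Angular", "Frontend Framework"), ("Next.js", "Frontend Framework"),
    ("Nuxt.js", "Frontend Framework"),
    ("jQuery", "JavaScript Library"), ("Bootstrap", "JavaScript Library"),
    ("Tailwind CSS", "JavaScript Library"),
    ("Laravel", "Backend Framework"), ("Django", "Backend Framework"),
    ("Ruby on Rails", "Backend Framework"), ("Express", "Backend Framework"),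
    ("ASP.NET", "Backend Framework"), ("Spring", "Backend Framework"),
    ("Nginx", "Web Server"), ("Apache", "Web Server"), ("IIS", "Web Server"),
    ("Cloudflare", "CDN/Proxy"), ("Amazon CloudFront", "CDN/Proxy"),
    ("Shopify", "E-commerce"), ("WooCommerce", "E-commerce"), ("Magento", "E-commerce"),
    ("Google Analytics", "Analytics"), ("Google Tag Manager", "Analytics"),
    ("Facebook Pixel", "Analytics"),
    ("reCAPTCHA", "Security"), ("hCaptcha", "Security"),
    ("PHP", "Programming Language"), ("Java", "Programming Language"),
    ("Node.js", "Programming Language") ]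

def get_tech_category_alt (tech_name : String) : String :=
  pvTechCategory.getD tech_name "Other"

-- ===== PRECONDITION & SPEC =====
def Spec_get_tech_category (tech_name : String) (out : String) : Prop := out = get_tech_category_alt tech_name
instance (tech_name : String) (out : String) : Decidable (Spec_get_tech_category tech_name out) := by unfold Spec_get_tech_category; infer_instance

-- ===== CLAIM (what is proved, stated in full; the proofs are below) =====
def Claim_equal_get_tech_category : Prop := ∀ (tech_name : String), Dom_get_tech_category tech_name → Spec_get_tech_category tech_name (get_tech_category tech_name)

-- ===== LEMMAS AND PROOFS =====

-- flatten one (category, techs) group into reverse-table entries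
def pvFlat (cats : List (String × List String)) : List (String × String) :=
  cats.flatMap (fun p => p.2.map (fun n => (n, p.1)))

-- lookup in one flattened group = membership test in that group's list
theorem pv_get?_group (t c : String) (ts : List String) (rest : List (String × String)) :
    (PySem.Dict.mk (ts.map (fun n => (n, c)) ++ rest)).get? t
      = if ts.contains t then some c else (PySem.Dict.mk rest).get? t := by
  induction ts with
  | nil => simp
  | cons x xs ih =>
      simp only [List.map_cons, List.cons_append, PySem.Dict.get?_mk_cons, ih,
        List.contains_cons]
      by_cases hx : x = t
      · simp [hx]
      · have : (x == t) = false := by simp [hx]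
        simp [this, Ne.symm hx]

-- A's loop over the groups = lookup in the flattened reverse table
theorem pv_loop_eq_flat (t : String) (cats : List (String × List String)) :
    pvLoopA t cats = (PySem.Dict.mk (pvFlat cats)).getD t "Other" := by
  induction cats with
  | nil => simp [pvLoopA, pvFlat, PySem.Dict.getD, PySem.Dict.get?]
  | cons p rest ih =>
      obtain ⟨c, ts⟩ := p
      simp only [pvLoopA, pvFlat, List.flatMap_cons]
      rw [PySem.Dict.getD, pv_get?_group]
      by_cases h : t ∈ ts
      · simp [h]
      · simp only [List.contains_eq_mem, h, decide_false, Bool.false_eq_true, if_false]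
        rw [ih, PySem.Dict.getD, pvFlat]

-- B's literal flat dict is exactly the flattening of A's category table
theorem pv_table_eq : pvTechCategory = PySem.Dict.mk (pvFlat pvCatsA) := by decide

-- ===== VERDICT (by name: the statement is the Claim_ definition above) =====
theorem get_tech_category_spec : Claim_equal_get_tech_category := by
  intro t _
  unfold Spec_get_tech_category get_tech_category get_tech_category_alt
  rw [pv_table_eq, pv_loop_eq_flat]
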